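-- pv_equiv track=rewrite | github.com/andprogrammer/daily-coding-problem | 38/main_podobne.py | is_itinerary
-- ===== SOURCE A (Python) =====
-- def helper(directions, curr):
--     if not directions:
--         return True
--     for i in range(0, len(directions)):
--         if curr[1] == directions[i][0]:
--             new_directions = directions[:i] + directions[i + 1:]
--             return True if not new_directions else helper(new_directions, directions[i])
--     return not directions
--
-- def is_itinerary(directions):
--     if not directions:
--         return True
--     for i in range(0, len(directions)):
--         curr_directions = directions[:i] + directions[i + 1:]
--         if helper(curr_directions, directions[i]):
--             return True
--     return False
-- ===== SOURCE B (Python) =====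
-- def _extract(dest, items):
--     """Remove the first item whose origin equals dest; return (item, rest) or None."""
--     prefix = []
--     for k, head in enumerate(items):
--         if head[0] == dest:
--             return head, prefix + items[k + 1:]
--         prefix.append(head)
--     return None
--
-- def is_itinerary(directions):
--     if not directions:
--         return True
--     before, after = [], list(directions)
--     while after:
--         start, rest = after[0], after[1:]
--         curr, remaining = start, before + rest
--         ok = True
--         while remaining:
--             step = _extract(curr[1], remaining)
--             if step is None:
--                 ok = False
--                 break
--             curr, remaining = step
--         if ok:
--             return True
--         before = before + [start]
--         after = rest
--     return False
-- ===== Notes on version B (the rewrite author's own statement) =====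
-- stated objective: alternative
-- what changed: A's recursive index-scan helper with slice rebuilding and an indexed outer for-loop are replaced by an iterative prefix-accumulating first-match extractor, an iterative while-loop chain, and a zipper (before/after) loop over candidate start flights.
import Mathlib
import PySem

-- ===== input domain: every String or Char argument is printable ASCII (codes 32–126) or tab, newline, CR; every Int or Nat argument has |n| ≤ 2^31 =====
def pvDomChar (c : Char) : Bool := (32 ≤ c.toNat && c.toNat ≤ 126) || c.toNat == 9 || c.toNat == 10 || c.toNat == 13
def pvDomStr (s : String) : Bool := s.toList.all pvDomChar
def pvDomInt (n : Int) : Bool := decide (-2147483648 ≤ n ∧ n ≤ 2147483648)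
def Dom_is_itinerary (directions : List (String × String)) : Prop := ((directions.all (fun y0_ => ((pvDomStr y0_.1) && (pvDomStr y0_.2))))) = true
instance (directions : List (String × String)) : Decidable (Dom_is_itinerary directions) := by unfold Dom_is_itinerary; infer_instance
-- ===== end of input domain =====

-- B recursively extracts the first match and iterates a zipper over start flights, instead of
-- A's recursive index-scan-and-slice helper; objective: alternative decomposition (same cost).

-- ===== PORT A =====
-- helper(directions, curr): first i with curr[1] == directions[i][0] (the for-loop's early
-- return is rendered by findIdx?); slices directions[:i] + directions[i+1:] are take/drop,
-- exact here since 0 ≤ i < len.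
def helperA (directions : List (String × String)) (curr : String × String) : Bool :=
  if directions = [] then true
  else
    match hi : directions.findIdx? (fun d => curr.2 == d.1) with
    | some i =>
      let nd := directions.take i ++ directions.drop (i + 1)
      if nd = [] then true else helperA nd directions[i]!
    | none => decide (directions = [])    -- `return not directions`
termination_by directions.length
decreasing_by
  have h := List.findIdx?_eq_some_iff_findIdx_eq.mp hi
  simp [List.length_take, List.length_drop]
  omega

-- `for i in range(0, len(directions)): if helper(...): return True` / `return False`
def loopA (directions : List (String × String)) (i : Nat) : Bool :=
  if i < directions.length then
    if helperA (directions.take i ++ directions.drop (i + 1)) directions[i]! then true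
    else loopA directions (i + 1)
  else false
termination_by directions.length - i

def is_itinerary (directions : List (String × String)) : Bool :=
  if directions = [] then true else loopA directions 0

-- ===== PORT B =====
-- _extract(dest, items): one forward pass accumulating the scanned prefix; on a hit returns
-- (head, prefix + items[k+1:]) — here `tail` is items[k+1:] of the enumerate loop.
def extractB (dest : String) (pre : List (String × String)) :
    List (String × String) → Option ((String × String) × List (String × String))
  | [] => none
  | head :: tail =>
    if head.1 == dest then some (head, pre ++ tail)
    else extractB dest (pre ++ [head]) tail

-- needed by chainB's termination; cited there by name
theorem extractB_len (dest : String) : ∀ (l pre : List (String × String)) m r,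
    extractB dest pre l = some (m, r) → r.length + 1 = pre.length + l.length := by
  intro l
  induction l with
  | nil => intro pre m r h; simp [extractB] at h
  | cons head tail ih =>
    intro pre m r h
    simp only [extractB] at h
    by_cases hd : head.1 == dest
    · simp [hd] at h
      simp [← h.2]
      omega
    · simp only [hd, Bool.false_eq_true, if_false] at h
      have := ih (pre ++ [head]) m r h
      simp [List.length_append] at this ⊢
      omega

-- the inner `while remaining:` loop of B
def chainB (curr : String × String) (remaining : List (String × String)) : Bool :=
  match remaining with
  | [] => true
  | a :: rest =>
    match he : extractB curr.2 [] (a :: rest) with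
    | none => false
    | some (m, r) => chainB m r
termination_by remaining.length
decreasing_by
  have := extractB_len curr.2 (a :: rest) [] m r he
  simp at this ⊢
  omega

-- the outer `while after:` zipper loop of B
def tryStarts (before after : List (String × String)) : Bool :=
  match after with
  | [] => false
  | start :: rest =>
    if chainB start (before ++ rest) then true
    else tryStarts (before ++ [start]) rest

def is_itinerary_alt (directions : List (String × String)) : Bool :=
  if directions = [] then true else tryStarts [] directions

-- ===== PRECONDITION & SPEC =====
def Spec_is_itinerary (directions : List (String × String)) (out : Bool) : Prop := out = is_itinerary_alt directions
instance (directions : List (String × String)) (out : Bool) : Decidable (Spec_is_itinerary directions out) := by unfold Spec_is_itinerary; infer_instance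

-- ===== CLAIM (what is proved, stated in full; the proofs are below) =====
def Claim_equal_is_itinerary : Prop := ∀ (directions : List (String × String)), Dom_is_itinerary directions → Spec_is_itinerary directions (is_itinerary directions)

-- ===== LEMMAS AND PROOFS =====

-- extractB agrees with A's first-match index scan
theorem extractB_cases (dest : String) (l : List (String × String)) : ∀ pre,
    (l.findIdx? (fun d => dest == d.1) = none ∧ extractB dest pre l = none) ∨
    (∃ i, l.findIdx? (fun d => dest == d.1) = some i ∧ i < l.length ∧
      extractB dest pre l = some (l[i]!, pre ++ (l.take i ++ l.drop (i + 1)))) := by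
  induction l with
  | nil => intro pre; left; simp [extractB]
  | cons head tail ih =>
    intro pre
    by_cases hd : head.1 == dest
    · right
      refine ⟨0, ?_, by simp, ?_⟩
      · simp at hd
        simp [List.findIdx?_cons, hd]
      · simp [extractB, hd]
    · have hd' : (dest == head.1) = false := by
        simp at hd ⊢; exact fun h => hd h.symm
      rcases ih (pre ++ [head]) with ⟨hf, he⟩ | ⟨i, hf, hlt, he⟩
      · left
        constructor
        · simp [List.findIdx?_cons, hd', hf]
        · simp [extractB, hd, he]
      · right
        refine ⟨i + 1, ?_, by simpa using hlt, ?_⟩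
        · simp [List.findIdx?_cons, hd', hf]
        · simp [extractB, hd, he]

-- A's helper equals B's chase loop
theorem helperA_eq_chainB : ∀ n (l : List (String × String)), l.length ≤ n →
    ∀ curr, helperA l curr = chainB curr l := by
  intro n
  induction n with
  | zero =>
    intro l hl curr
    have : l = [] := List.eq_nil_of_length_eq_zero (by omega)
    subst this
    simp [helperA, chainB]
  | succ n ih =>
    intro l hl curr
    cases l with
    | nil => simp [helperA, chainB]
    | cons a rest =>
      rcases extractB_cases curr.2 (a :: rest) [] with ⟨hf, he⟩ | ⟨i, hf, hlt, he⟩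
      all_goals rw [helperA, chainB, if_neg (List.cons_ne_nil a rest)]
      · -- no continuation exists on either side
        split
        · rename_i j hj; rw [hf] at hj; simp at hj
        · split
          · simp
          · rename_i m r hr; rw [he] at hr; simp at hr
      · simp only [List.nil_append] at he
        split
        · rename_i j hj
          rw [hf] at hj
          injection hj with hj; subst hj
          split
          · rename_i hnone; rw [he] at hnone; simp at hnone
          · rename_i m r hr
            rw [he] at hr
            simp only [Option.some.injEq, Prod.mk.injEq] at hr
            obtain ⟨hm, hr⟩ := hr
            subst hm; subst hr
            simp only [List.drop_succ_cons]
            by_cases hnd : List.take i (a :: rest) ++ List.drop i rest = []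
            · simp [hnd, chainB]
            · rw [if_neg hnd]
              apply ih
              simp only [List.length_append, List.length_take, List.length_drop,
                List.length_cons] at *
              omega
        · rename_i hnone; rw [hf] at hnone; simp at hnone


-- A's indexed outer loop equals B's zipper loop
theorem loopA_eq_tryStarts : ∀ n (directions : List (String × String)) i,
    directions.length - i = n →
    loopA directions i = tryStarts (directions.take i) (directions.drop i) := by
  intro n
  induction n with
  | zero =>
    intro directions i h
    rw [loopA]
    have hge : ¬ i < directions.length := by omega
    rw [if_neg hge]
    rw [List.drop_eq_nil_of_le (by omega)]
    rw [tryStarts]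
  | succ n ih =>
    intro directions i h
    have hlt : i < directions.length := by omega
    rw [loopA, if_pos hlt]
    rw [List.drop_eq_getElem_cons hlt, tryStarts]
    have hget : directions[i]! = directions[i] := getElem!_pos directions i hlt
    rw [hget]
    rw [helperA_eq_chainB (directions.take i ++ directions.drop (i+1)).length _ le_rfl]
    by_cases hc : chainB directions[i] (directions.take i ++ directions.drop (i + 1)) = true
    · rw [if_pos hc, if_pos hc]
    · rw [if_neg hc, if_neg hc]
      have : directions.take i ++ [directions[i]] = directions.take (i + 1) := by
        rw [List.take_add_one, List.getElem?_eq_getElem hlt]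
        rfl
      rw [this]
      exact ih directions (i + 1) (by omega)


-- ===== VERDICT (by name: the statement is the Claim_ definition above) =====
theorem is_itinerary_spec : Claim_equal_is_itinerary := by
  intro directions _
  unfold Spec_is_itinerary is_itinerary is_itinerary_alt
  by_cases h : directions = []
  · simp [h]
  · simp only [h, if_false]
    simpa using loopA_eq_tryStarts directions.length directions 0 (by omega)
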